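-- pv_equiv track=rewrite | github.com/creatoradams/Graphing-Algorithms | Task2.py | _finish_order
-- ===== SOURCE A (Python) =====
-- def _finish_order(g):
--     vis, order = set(), []
--
--     def go(u):
--         vis.add(u)
--         for v in g[u]:
--             if v not in vis:
--                 go(v)
--         order.append(u) # push after exploring
--
--     for u in g:
--         if u not in vis:
--             go(u)
--     return order
-- ===== SOURCE B (Python) =====
-- def _finish_order(g):
--     vis, order = set(), []
--     for r in g:
--         if r in vis:
--             continue
--         vis.add(r)
--         stack = [(r, iter(g[r]))]
--         while stack:
--             node, it = stack[-1]
--             for v in it: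
--                 if v not in vis:
--                     vis.add(v)
--                     stack.append((v, iter(g[v])))
--                     break
--             else:
--                 order.append(node)
--                 stack.pop()
--     return order
-- ===== Notes on version B (the rewrite author's own statement) =====
-- stated objective: alternative
-- what changed: A's recursive DFS helper (call stack + shared mutable vis/order) is replaced by an iterative DFS with an explicit stack of (node, child-iterator) frames, producing the same finish (post-order) sequence.
import Mathlib
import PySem

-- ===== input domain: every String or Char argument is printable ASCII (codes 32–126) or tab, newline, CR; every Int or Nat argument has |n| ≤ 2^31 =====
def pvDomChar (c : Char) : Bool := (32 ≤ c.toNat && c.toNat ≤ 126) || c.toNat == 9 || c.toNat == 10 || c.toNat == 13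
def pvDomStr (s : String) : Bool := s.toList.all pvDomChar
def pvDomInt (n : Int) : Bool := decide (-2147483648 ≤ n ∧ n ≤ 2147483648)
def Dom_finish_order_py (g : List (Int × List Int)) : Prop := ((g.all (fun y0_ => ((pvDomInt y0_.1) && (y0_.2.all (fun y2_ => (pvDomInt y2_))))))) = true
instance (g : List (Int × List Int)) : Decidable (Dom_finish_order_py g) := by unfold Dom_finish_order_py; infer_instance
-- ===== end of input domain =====

-- B replaces A's recursive DFS helper by an explicit iterative stack of (node, remaining-children) frames; same finish order, return value only.

-- ===== PORT A =====
-- A's recursion is ported with a fuel parameter (g.length + 2 bounds the recursion depth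
-- on inputs where A returns); fuel is a totality guard only, never reached under Pre_.
mutual
/-- `go(u)`: vis.add(u); for v in g[u]: if v not in vis: go(v); order.append(u).
`d.getD u []` is `g[u]`; a missing key (Python KeyError) is excluded by `Pre_`. -/
def pvGoA (d : PySem.Dict Int (List Int)) : Nat → Int → PySem.Set Int × List Int → PySem.Set Int × List Int
  | 0, _, s => s
  | f+1, u, s =>
    let s1 := pvGoAL d f (d.getD u []) (s.1.add u, s.2)
    (s1.1, s1.2 ++ [u])
  termination_by f _ _ => (f, 0)

/-- the `for v in g[u]` loop of `go` -/
def pvGoAL (d : PySem.Dict Int (List Int)) : Nat → List Int → PySem.Set Int × List Int → PySem.Set Int × List Int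
  | _, [], s => s
  | f, v :: vs, s => pvGoAL d f vs (if s.1.contains v then s else pvGoA d f v s)
  termination_by f l _ => (f, l.length + 1)
end

/-- `for u in g: if u not in vis: go(u)` -/
def pvTopA (d : PySem.Dict Int (List Int)) (F : Nat) : List Int → PySem.Set Int × List Int → PySem.Set Int × List Int
  | [], s => s
  | u :: us, s => pvTopA d F us (if s.1.contains u then s else pvGoA d F u s)

def finish_order_py (g : List (Int × List Int)) : List Int :=
  let d := PySem.Dict.ofList g
  (pvTopA d (g.length + 2) d.keys (PySem.Set.empty, [])).2

-- ===== PORT B =====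
/-- the inner `for v in it` loop: advance the iterator past visited nodes; returns the
first unvisited child together with the iterator's remaining elements, or none. -/
def pvFindU (vis : PySem.Set Int) : List Int → Option (Int × List Int)
  | [] => none
  | v :: vs => if vis.contains v then pvFindU vis vs else some (v, vs)

/-- the `while stack` loop; a frame `(node, cs)` is Python's `(node, it)` with `cs` the
iterator's remaining elements (the mutated iterator of `stack[-1]` is re-pushed as
`(node, rest)`).  Fuel (consumed only when a node is pushed) is a totality guard,
never reached under `Pre_`. -/
def pvRunB (d : PySem.Dict Int (List Int)) : Nat → List (Int × List Int) → PySem.Set Int × List Int → PySem.Set Int × List Int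
  | 0, _, s => s
  | _+1, [], s => s
  | f+1, (node, cs) :: S, s =>
    match pvFindU s.1 cs with
    | none => pvRunB d (f+1) S (s.1, s.2 ++ [node])
    | some (v, rest) => pvRunB d f ((v, d.getD v []) :: (node, rest) :: S) (s.1.add v, s.2)
  termination_by f S _ => (f, S.length)

/-- `for r in g: if r in vis: continue; vis.add(r); stack = [(r, iter(g[r]))]; while stack: …` -/
def pvTopB (d : PySem.Dict Int (List Int)) (F : Nat) : List Int → PySem.Set Int × List Int → PySem.Set Int × List Int
  | [], s => s
  | r :: rs, s => pvTopB d F rs (if s.1.contains r then s else pvRunB d F [(r, d.getD r [])] (s.1.add r, s.2))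

def finish_order_py_alt (g : List (Int × List Int)) : List Int :=
  let d := PySem.Dict.ofList g
  (pvTopB d (g.length + 2) d.keys (PySem.Set.empty, [])).2

-- ===== PRECONDITION & SPEC =====
-- Pre_ excludes exactly the inputs where A raises KeyError: a listed neighbour that is
-- not itself a key of the graph (B raises there too).
def Pre_finish_order_py (g : List (Int × List Int)) : Prop :=
  ∀ p ∈ g, ∀ v ∈ p.2, v ∈ g.map Prod.fst
instance (g : List (Int × List Int)) : Decidable (Pre_finish_order_py g) := by unfold Pre_finish_order_py; infer_instance

def pvWitness_finish_order_py : (List (Int × List Int)) := ([(0, [1]), (1, [0, 1]), (2, [])])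

def Spec_finish_order_py (g : List (Int × List Int)) (out : List Int) : Prop := out = finish_order_py_alt g
instance (g : List (Int × List Int)) (out : List Int) : Decidable (Spec_finish_order_py g out) := by unfold Spec_finish_order_py; infer_instance

-- ===== CLAIM (what is proved, stated in full; the proofs are below) =====
def Claim_equal_finish_order_py : Prop := ∀ (g : List (Int × List Int)), Dom_finish_order_py g → Pre_finish_order_py g → Spec_finish_order_py g (finish_order_py g)

-- ===== LEMMAS AND PROOFS =====

/-- number of still-unvisited keys: the common termination/fuel measure -/
def pvU (d : PySem.Dict Int (List Int)) (vis : PySem.Set Int) : Nat :=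
  (d.keys.filter (fun k => !(vis.contains k))).length

theorem pv_filter_mono {l : List Int} {p q : Int → Bool} (h : ∀ x, q x = true → p x = true) :
    (l.filter q).length ≤ (l.filter p).length := by
  induction l with
  | nil => simp
  | cons x xs ih =>
    by_cases hq : q x = true
    · simp [hq, h x hq]; omega
    · simp [hq]
      by_cases hp : p x = true <;> simp [hp] <;> omega

theorem pv_contains_eq (s : PySem.Set Int) (x : Int) : s.contains x = decide (x ∈ s) := by
  by_cases hm : x ∈ s
  · simp [hm, (PySem.Set.contains_iff s x).mpr hm]
  · cases hc : s.contains x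
    · simp [hm]
    · exact absurd ((PySem.Set.contains_iff s x).mp hc) hm

theorem pvU_mono {d : PySem.Dict Int (List Int)} {v1 v2 : PySem.Set Int}
    (h : ∀ x, x ∈ v1 → x ∈ v2) : pvU d v2 ≤ pvU d v1 := by
  apply pv_filter_mono
  intro x hx
  simp only [pv_contains_eq, Bool.not_eq_true', decide_eq_false_iff_not] at hx ⊢
  exact fun hm => hx (h x hm)

theorem pvU_pos {d : PySem.Dict Int (List Int)} {vis : PySem.Set Int} {u : Int}
    (hu : u ∈ d.keys) (hnv : u ∉ vis) : 1 ≤ pvU d vis := by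
  have hmem : u ∈ d.keys.filter (fun k => !(vis.contains k)) := by
    refine List.mem_filter.mpr ⟨hu, ?_⟩
    simp [pv_contains_eq, hnv]
  have := List.length_pos_of_mem hmem
  unfold pvU; omega

theorem pv_filter_add_len {vis : PySem.Set Int} {u : Int} (hnv : u ∉ vis) :
    ∀ l : List Int, l.Nodup → u ∈ l →
    (l.filter (fun k => !((vis.add u).contains k))).length + 1
      = (l.filter (fun k => !(vis.contains k))).length := by
  intro l
  induction l with
  | nil => simp
  | cons x xs ih =>
    intro hnd hm
    by_cases hx : x = u
    · subst hx
      have hxs : x ∉ xs := (List.nodup_cons.mp hnd).1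
      have hcong : ∀ k ∈ xs, (!((vis.add x).contains k)) = (!(vis.contains k)) := by
        intro k hk
        have hku : k ≠ x := fun h => hxs (h ▸ hk)
        simp only [pv_contains_eq]
        by_cases hkv : k ∈ vis
        · simp [hkv, (PySem.Set.mem_add vis x k).mpr (Or.inl hkv)]
        · have : k ∉ vis.add x := fun h => ((PySem.Set.mem_add vis x k).mp h).elim hkv hku
          simp [hkv, this]
      have h1 : x ∈ vis.add x := (PySem.Set.mem_add vis x x).mpr (Or.inr rfl)
      have hx1 : (!((vis.add x).contains x)) = false := by simp [pv_contains_eq, h1]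
      have hx2 : (!(vis.contains x)) = true := by simp [pv_contains_eq, hnv]
      simp only [List.filter_cons, hx1, hx2, if_true, if_false, List.length_cons]
      rw [List.filter_congr hcong]
      simp
    · have hm' : u ∈ xs := by
        rcases List.mem_cons.mp hm with h | h
        · exact absurd h.symm hx
        · exact h
      have hnd' : xs.Nodup := (List.nodup_cons.mp hnd).2
      have hcx : (vis.add u).contains x = vis.contains x := by
        simp only [pv_contains_eq]
        by_cases hxv : x ∈ vis
        · simp [hxv, (PySem.Set.mem_add vis u x).mpr (Or.inl hxv)]
        · have : x ∉ vis.add u := fun h => ((PySem.Set.mem_add vis u x).mp h).elim hxv hx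
          simp [hxv, this]
      simp only [List.filter_cons, hcx]
      by_cases hb : (!(vis.contains x)) = true
      · simp only [hb, if_true, List.length_cons]
        have := ih hnd' hm'
        omega
      · simp only [hb, if_false]
        exact ih hnd' hm'

theorem pvU_add {d : PySem.Dict Int (List Int)} {vis : PySem.Set Int} {u : Int}
    (hnd : d.keys.Nodup) (hu : u ∈ d.keys) (hnv : u ∉ vis) :
    pvU d (vis.add u) + 1 = pvU d vis :=
  pv_filter_add_len hnv d.keys hnd hu


theorem pvGoA_zero (d : PySem.Dict Int (List Int)) (u : Int) (s : PySem.Set Int × List Int) :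
    pvGoA d 0 u s = s := by simp [pvGoA]

theorem pvGoA_succ (d : PySem.Dict Int (List Int)) (f : Nat) (u : Int) (s : PySem.Set Int × List Int) :
    pvGoA d (f+1) u s
      = ((pvGoAL d f (d.getD u []) (s.1.add u, s.2)).1,
         (pvGoAL d f (d.getD u []) (s.1.add u, s.2)).2 ++ [u]) := by
  simp [pvGoA]

theorem pvGoAL_nil (d : PySem.Dict Int (List Int)) (f : Nat) (s : PySem.Set Int × List Int) :
    pvGoAL d f [] s = s := by simp [pvGoAL]

theorem pvGoAL_cons (d : PySem.Dict Int (List Int)) (f : Nat) (v : Int) (vs : List Int) (s : PySem.Set Int × List Int) :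
    pvGoAL d f (v :: vs) s = pvGoAL d f vs (if s.1.contains v then s else pvGoA d f v s) := by
  rw [pvGoAL]

theorem pvMonoAL_of (d : PySem.Dict Int (List Int)) (f : Nat)
    (hA : ∀ u s, ∀ x, x ∈ s.1 → x ∈ (pvGoA d f u s).1) :
    ∀ cs s x, x ∈ s.1 → x ∈ (pvGoAL d f cs s).1 := by
  intro cs
  induction cs with
  | nil => intro s x hx; rw [pvGoAL_nil]; exact hx
  | cons v vs ih =>
    intro s x hx
    rw [pvGoAL_cons]
    cases hcv : s.1.contains v
    · simp only [hcv, Bool.false_eq_true, if_false]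
      exact ih _ x (hA v s x hx)
    · simp only [hcv, if_true]
      exact ih s x hx

theorem pvMonoA (d : PySem.Dict Int (List Int)) :
    ∀ f u s x, x ∈ s.1 → x ∈ (pvGoA d f u s).1 := by
  intro f
  induction f with
  | zero => intro u s x hx; rw [pvGoA_zero]; exact hx
  | succ f ih =>
    intro u s x hx
    rw [pvGoA_succ]
    exact pvMonoAL_of d f ih _ _ x ((PySem.Set.mem_add s.1 u x).mpr (Or.inl hx))

theorem pvMonoAL (d : PySem.Dict Int (List Int)) (f : Nat) :
    ∀ cs s x, x ∈ s.1 → x ∈ (pvGoAL d f cs s).1 :=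
  pvMonoAL_of d f (pvMonoA d f)

theorem pvGoAL_append (d : PySem.Dict Int (List Int)) (f : Nat) (xs ys : List Int) :
    ∀ s, pvGoAL d f (xs ++ ys) s = pvGoAL d f ys (pvGoAL d f xs s) := by
  induction xs with
  | nil => intro s; rw [List.nil_append, pvGoAL_nil]
  | cons v vs ih => intro s; rw [List.cons_append, pvGoAL_cons, pvGoAL_cons, ih]

theorem pvGoAL_visited (d : PySem.Dict Int (List Int)) (f : Nat) :
    ∀ xs s, (∀ v ∈ xs, v ∈ s.1) → pvGoAL d f xs s = s := by
  intro xs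
  induction xs with
  | nil => intro s _; rw [pvGoAL_nil]
  | cons v vs ih =>
    intro s h
    rw [pvGoAL_cons]
    have hc : s.1.contains v = true := (PySem.Set.contains_iff s.1 v).mpr (h v List.mem_cons_self)
    simp only [hc, if_true]
    exact ih s (fun w hw => h w (List.mem_cons_of_mem _ hw))

theorem pvFindU_none {vis : PySem.Set Int} :
    ∀ {cs : List Int}, pvFindU vis cs = none → ∀ v ∈ cs, v ∈ vis := by
  intro cs
  induction cs with
  | nil => intro _ v hv; cases hv
  | cons w ws ih =>
    intro h v hv
    rw [pvFindU] at h
    by_cases hm : w ∈ vis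
    · rw [if_pos ((PySem.Set.contains_iff vis w).mpr hm)] at h
      rcases List.mem_cons.mp hv with rfl | hv'
      · exact hm
      · exact ih h v hv'
    · rw [if_neg (fun hh => hm ((PySem.Set.contains_iff vis w).mp hh))] at h
      cases h

theorem pvFindU_some {vis : PySem.Set Int} :
    ∀ {cs : List Int} {v : Int} {rest : List Int}, pvFindU vis cs = some (v, rest) →
      ∃ pre, cs = pre ++ v :: rest ∧ (∀ x ∈ pre, x ∈ vis) ∧ v ∉ vis := by
  intro cs
  induction cs with
  | nil => intro v rest h; cases h
  | cons w ws ih =>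
    intro v rest h
    rw [pvFindU] at h
    by_cases hm : w ∈ vis
    · rw [if_pos ((PySem.Set.contains_iff vis w).mpr hm)] at h
      obtain ⟨pre, rfl, hpre, hnv⟩ := ih h
      refine ⟨w :: pre, rfl, ?_, hnv⟩
      intro x hx
      rcases List.mem_cons.mp hx with rfl | hx'
      · exact hm
      · exact hpre x hx'
    · rw [if_neg (fun hh => hm ((PySem.Set.contains_iff vis w).mp hh))] at h
      injection h with h
      obtain ⟨rfl, rfl⟩ : w = v ∧ ws = rest := ⟨congrArg Prod.fst h, congrArg Prod.snd h⟩
      exact ⟨[], rfl, by simp, hm⟩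

theorem pvRunB_nil (d : PySem.Dict Int (List Int)) (f : Nat) (s : PySem.Set Int × List Int) :
    pvRunB d f [] s = s := by cases f <;> simp [pvRunB]

theorem pvStab (d : PySem.Dict Int (List Int))
    (hc : ∀ u : Int, ∀ v ∈ d.getD u [], v ∈ d.keys) (hnd : d.keys.Nodup) :
    ∀ n : Nat,
    (∀ u s f f', u ∈ d.keys → u ∉ s.1 → pvU d s.1 ≤ n → pvU d s.1 ≤ f → pvU d s.1 ≤ f' →
       pvGoA d f u s = pvGoA d f' u s)
    ∧ (∀ cs, (∀ v ∈ cs, v ∈ d.keys) → ∀ s f f', pvU d s.1 ≤ n → pvU d s.1 ≤ f → pvU d s.1 ≤ f' →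
       pvGoAL d f cs s = pvGoAL d f' cs s) := by
  intro n
  induction n using Nat.strong_induction_on with
  | _ n ih =>
    have hgo : ∀ u s f f', u ∈ d.keys → u ∉ s.1 → pvU d s.1 ≤ n → pvU d s.1 ≤ f → pvU d s.1 ≤ f' →
        pvGoA d f u s = pvGoA d f' u s := by
      intro u s f f' hu hnv hn hf hf'
      have h1 : 1 ≤ pvU d s.1 := pvU_pos hu hnv
      obtain ⟨a, rfl⟩ : ∃ a, f = a + 1 := ⟨f - 1, by omega⟩
      obtain ⟨b, rfl⟩ : ∃ b, f' = b + 1 := ⟨f' - 1, by omega⟩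
      have hUadd : pvU d (s.1.add u) + 1 = pvU d s.1 := pvU_add hnd hu hnv
      have hL := (ih (n-1) (by omega)).2 (d.getD u []) (hc u) (s.1.add u, s.2) a b
        (by simp only []; omega) (by simp only []; omega) (by simp only []; omega)
      rw [pvGoA_succ, pvGoA_succ, hL]
    refine ⟨hgo, ?_⟩
    intro cs
    induction cs with
    | nil => intro _ s f f' _ _ _; rw [pvGoAL_nil, pvGoAL_nil]
    | cons v vs ihc =>
      intro hcs s f f' hn hf hf'
      have hv : v ∈ d.keys := hcs v List.mem_cons_self
      have hcs' : ∀ w ∈ vs, w ∈ d.keys := fun w hw => hcs w (List.mem_cons_of_mem _ hw)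
      rw [pvGoAL_cons, pvGoAL_cons]
      cases hcv : s.1.contains v
      · simp only [hcv, Bool.false_eq_true, if_false]
        have hnv : v ∉ s.1 := by simp [pv_contains_eq] at hcv; exact hcv
        have heq : pvGoA d f v s = pvGoA d f' v s := hgo v s f f' hv hnv hn hf hf'
        rw [← heq]
        have hmono : pvU d (pvGoA d f v s).1 ≤ pvU d s.1 :=
          pvU_mono (fun x hx => pvMonoA d f v s x hx)
        exact ihc hcs' _ f f' (le_trans hmono hn) (le_trans hmono hf) (le_trans hmono hf')
      · simp only [hcv, if_true]
        exact ihc hcs' s f f' hn hf hf'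


theorem pvRunB_cons_none (d : PySem.Dict Int (List Int)) {f : Nat} {node : Int} {cs : List Int}
    {S : List (Int × List Int)} {s : PySem.Set Int × List Int}
    (h : pvFindU s.1 cs = none) :
    pvRunB d (f+1) ((node, cs) :: S) s = pvRunB d (f+1) S (s.1, s.2 ++ [node]) := by
  rw [pvRunB, h]

theorem pvRunB_cons_some (d : PySem.Dict Int (List Int)) {f : Nat} {node : Int} {cs : List Int}
    {S : List (Int × List Int)} {s : PySem.Set Int × List Int} {v : Int} {rest : List Int}
    (h : pvFindU s.1 cs = some (v, rest)) :
    pvRunB d (f+1) ((node, cs) :: S) s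
      = pvRunB d f ((v, d.getD v []) :: (node, rest) :: S) (s.1.add v, s.2) := by
  rw [pvRunB, h]

theorem pvStabB (d : PySem.Dict Int (List Int))
    (hc : ∀ u : Int, ∀ v ∈ d.getD u [], v ∈ d.keys) (hnd : d.keys.Nodup) :
    ∀ n L (S : List (Int × List Int)) (s : PySem.Set Int × List Int) f f', S.length ≤ L →
      (∀ fr ∈ S, ∀ v ∈ fr.2, v ∈ d.keys) →
      pvU d s.1 ≤ n → pvU d s.1 < f → pvU d s.1 < f' →
      pvRunB d f S s = pvRunB d f' S s := by
  intro n
  induction n using Nat.strong_induction_on with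
  | _ n ihn =>
    intro L
    induction L with
    | zero =>
      intro S s f f' hlen _ _ _ _
      have hS : S = [] := List.eq_nil_of_length_eq_zero (by first | (dsimp only; omega) | omega)
      subst hS
      rw [pvRunB_nil, pvRunB_nil]
    | succ L ihL =>
      intro S s f f' hlen hcl hn hf hf'
      cases S with
      | nil => rw [pvRunB_nil, pvRunB_nil]
      | cons fr S' =>
        obtain ⟨node, cs⟩ := fr
        obtain ⟨a, rfl⟩ : ∃ a, f = a + 1 := ⟨f - 1, by omega⟩
        obtain ⟨b, rfl⟩ : ∃ b, f' = b + 1 := ⟨f' - 1, by omega⟩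
        cases hfind : pvFindU s.1 cs with
        | none =>
          rw [pvRunB_cons_none d hfind, pvRunB_cons_none d hfind]
          exact ihL S' (s.1, s.2 ++ [node]) (a+1) (b+1) (by simpa using hlen)
            (fun fr hfr => hcl fr (List.mem_cons_of_mem _ hfr)) hn hf hf'
        | some p =>
          obtain ⟨v, rest⟩ := p
          obtain ⟨pre, hcseq, hpre, hnv⟩ := pvFindU_some hfind
          have hv : v ∈ d.keys := hcl (node, cs) List.mem_cons_self v
            (by rw [hcseq]; exact List.mem_append_right _ List.mem_cons_self)
          have h1 : 1 ≤ pvU d s.1 := pvU_pos hv hnv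
          have hUadd : pvU d (s.1.add v) + 1 = pvU d s.1 := pvU_add hnd hv hnv
          rw [pvRunB_cons_some d hfind, pvRunB_cons_some d hfind]
          have hcl' : ∀ fr ∈ ((v, d.getD v []) :: (node, rest) :: S'), ∀ w ∈ fr.2, w ∈ d.keys := by
            intro fr hfr w hw
            rcases List.mem_cons.mp hfr with rfl | hfr'
            · exact hc v w hw
            rcases List.mem_cons.mp hfr' with rfl | hfr''
            · exact hcl (node, cs) List.mem_cons_self w
                (by rw [hcseq]; exact List.mem_append_right _ (List.mem_cons_of_mem _ hw))
            · exact hcl fr (List.mem_cons_of_mem _ hfr'') w hw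
          exact ihn (n-1) (by first | (dsimp only; omega) | omega) ((v, d.getD v []) :: (node, rest) :: S').length _ _ a b
            le_rfl hcl' (by first | (dsimp only; omega) | omega) (by first | (dsimp only; omega) | omega) (by first | (dsimp only; omega) | omega)

theorem pvSim (d : PySem.Dict Int (List Int))
    (hc : ∀ u : Int, ∀ v ∈ d.getD u [], v ∈ d.keys) (hnd : d.keys.Nodup) :
    ∀ n (node : Int) (cs : List Int) (S : List (Int × List Int)) (vis : PySem.Set Int) (order : List Int) f,
      (∀ v ∈ cs, v ∈ d.keys) → (∀ fr ∈ S, ∀ v ∈ fr.2, v ∈ d.keys) →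
      pvU d vis ≤ n → n < f →
      pvRunB d f ((node, cs) :: S) (vis, order)
        = pvRunB d (pvU d (pvGoAL d n cs (vis, order)).1 + 1) S
            ((pvGoAL d n cs (vis, order)).1, (pvGoAL d n cs (vis, order)).2 ++ [node]) := by
  intro n
  induction n using Nat.strong_induction_on with
  | _ n ihn =>
    intro node cs S vis order f hcs hcl hn hf
    obtain ⟨a, rfl⟩ : ∃ a, f = a + 1 := ⟨f - 1, by omega⟩
    cases hfind : pvFindU vis cs with
    | none =>
      have hAL : pvGoAL d n cs (vis, order) = (vis, order) :=
        pvGoAL_visited d n cs (vis, order) (pvFindU_none hfind)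
      rw [pvRunB_cons_none d hfind, hAL]
      exact pvStabB d hc hnd (pvU d vis) S.length S (vis, order ++ [node]) (a+1) (pvU d vis + 1)
        le_rfl hcl le_rfl (by first | (dsimp only; omega) | omega) (by first | (dsimp only; omega) | omega)
    | some p =>
      obtain ⟨v, rest⟩ := p
      obtain ⟨pre, hcseq, hpre, hnv⟩ := pvFindU_some hfind
      have hv : v ∈ d.keys := hcs v (by rw [hcseq]; exact List.mem_append_right _ List.mem_cons_self)
      have h1 : 1 ≤ pvU d vis := pvU_pos hv hnv
      obtain ⟨m, rfl⟩ : ∃ m, n = m + 1 := ⟨n - 1, by omega⟩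
      have hUadd : pvU d (vis.add v) + 1 = pvU d vis := pvU_add hnd hv hnv
      rw [pvRunB_cons_some d hfind]
      have hrest : ∀ w ∈ rest, w ∈ d.keys := fun w hw =>
        hcs w (by rw [hcseq]; exact List.mem_append_right _ (List.mem_cons_of_mem _ hw))
      have hcl' : ∀ fr ∈ ((node, rest) :: S), ∀ w ∈ fr.2, w ∈ d.keys := by
        intro fr hfr w hw
        rcases List.mem_cons.mp hfr with rfl | hfr'
        · exact hrest w hw
        · exact hcl fr hfr' w hw
      have step1 := ihn m (by first | (dsimp only; omega) | omega) v (d.getD v []) ((node, rest) :: S) (vis.add v) order a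
        (hc v) hcl' (by first | (dsimp only; omega) | omega) (by first | (dsimp only; omega) | omega)
      rw [step1]
      have hU1 : pvU d (pvGoAL d m (d.getD v []) (vis.add v, order)).1 ≤ pvU d (vis.add v) :=
        pvU_mono (fun x hx => pvMonoAL d m _ _ x hx)
      have step2 := ihn (pvU d (pvGoAL d m (d.getD v []) (vis.add v, order)).1) (by first | (dsimp only; omega) | omega)
        node rest S (pvGoAL d m (d.getD v []) (vis.add v, order)).1
        ((pvGoAL d m (d.getD v []) (vis.add v, order)).2 ++ [v])
        (pvU d (pvGoAL d m (d.getD v []) (vis.add v, order)).1 + 1)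
        hrest (fun fr hfr => hcl fr hfr) le_rfl (by first | (dsimp only; omega) | omega)
      rw [step2]
      -- now rewrite the RHS goAL the same way
      have hALcs : pvGoAL d (m+1) cs (vis, order)
          = pvGoAL d (pvU d (pvGoAL d m (d.getD v []) (vis.add v, order)).1) rest
              ((pvGoAL d m (d.getD v []) (vis.add v, order)).1,
               (pvGoAL d m (d.getD v []) (vis.add v, order)).2 ++ [v]) := by
        rw [hcseq, pvGoAL_append, pvGoAL_visited d (m+1) pre (vis, order) hpre, pvGoAL_cons]
        rw [if_neg (by simp [pv_contains_eq]; exact hnv)]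
        rw [pvGoA_succ]
        exact (pvStab d hc hnd (m+1)).2 rest hrest _ (m+1)
          (pvU d (pvGoAL d m (d.getD v []) (vis.add v, order)).1) (by first | (dsimp only; omega) | omega) (by first | (dsimp only; omega) | omega) le_rfl
      rw [hALcs]

theorem pvTop (d : PySem.Dict Int (List Int))
    (hc : ∀ u : Int, ∀ v ∈ d.getD u [], v ∈ d.keys) (hnd : d.keys.Nodup) :
    ∀ (us : List Int) (s : PySem.Set Int × List Int) F F', (∀ u ∈ us, u ∈ d.keys) →
      pvU d s.1 < F → pvU d s.1 < F' →
      pvTopA d F us s = pvTopB d F' us s := by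
  intro us
  induction us with
  | nil => intro s F F' _ _ _; rw [pvTopA, pvTopB]
  | cons u us ih =>
    intro s F F' hus hF hF'
    rw [pvTopA, pvTopB]
    cases hcu : s.1.contains u
    · simp only [hcu, Bool.false_eq_true, if_false]
      have hnv : u ∉ s.1 := by simpa [pv_contains_eq] using hcu
      have hu : u ∈ d.keys := hus u List.mem_cons_self
      have h1 : 1 ≤ pvU d s.1 := pvU_pos hu hnv
      have hUadd : pvU d (s.1.add u) + 1 = pvU d s.1 := pvU_add hnd hu hnv
      obtain ⟨A, rfl⟩ : ∃ A, F = A + 1 := ⟨F - 1, by omega⟩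
      have hsim := pvSim d hc hnd (pvU d (s.1.add u)) u (d.getD u []) [] (s.1.add u) s.2 F'
        (hc u) (by simp) le_rfl (by first | (dsimp only; omega) | omega)
      rw [pvRunB_nil] at hsim
      have hA : pvGoA d (A+1) u s
          = ((pvGoAL d (pvU d (s.1.add u)) (d.getD u []) (s.1.add u, s.2)).1,
             (pvGoAL d (pvU d (s.1.add u)) (d.getD u []) (s.1.add u, s.2)).2 ++ [u]) := by
        rw [pvGoA_succ]
        have hstab := (pvStab d hc hnd A).2 (d.getD u []) (hc u) (s.1.add u, s.2) A
          (pvU d (s.1.add u)) (by first | (dsimp only; omega) | omega) (by first | (dsimp only; omega) | omega) le_rfl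
        rw [hstab]
      rw [hA, hsim]
      have hU1 : pvU d (pvGoAL d (pvU d (s.1.add u)) (d.getD u []) (s.1.add u, s.2)).1
          ≤ pvU d (s.1.add u) := pvU_mono (fun x hx => pvMonoAL d _ _ _ x hx)
      exact ih _ (A+1) F' (fun w hw => hus w (List.mem_cons_of_mem _ hw)) (by first | (dsimp only; omega) | omega) (by first | (dsimp only; omega) | omega)
    · simp only [hcu, if_true]
      exact ih s F F' (fun w hw => hus w (List.mem_cons_of_mem _ hw)) hF hF'

theorem pv_keys_ofList (g : List (Int × List Int)) :
    (PySem.Dict.ofList g).keys = PySem.Set.ofList (g.map Prod.fst) := by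
  calc (PySem.Dict.ofList g).keys
      = (List.foldl (fun d p => d.insert p.1 p.2) PySem.Dict.empty g).keys := rfl
    _ = PySem.Set.update PySem.Dict.empty.keys (g.map Prod.fst) :=
        PySem.Dict.keys_foldl_insert_key g Prod.fst (fun _ p => p.2) PySem.Dict.empty
    _ = PySem.Set.update [] (g.map Prod.fst) := by rw [PySem.Dict.keys_empty]
    _ = PySem.Set.ofList (g.map Prod.fst) := PySem.Set.update_nil_left _

theorem pv_mem_items_update {p : Int × List Int} :
    ∀ (l : List (Int × List Int)) (d0 : PySem.Dict Int (List Int)),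
      p ∈ (d0.update l).items → p ∈ l ∨ p ∈ d0.items := by
  intro l
  induction l with
  | nil => intro d0 h; exact Or.inr h
  | cons q l ih =>
    intro d0 h
    rcases ih (d0.insert q.1 q.2) h with h1 | h2
    · exact Or.inl (List.mem_cons_of_mem _ h1)
    · rcases (PySem.Dict.mem_items_insert _ _ _ _).mp h2 with h3 | h3
      · exact Or.inl (by rw [h3]; exact List.mem_cons_self)
      · exact Or.inr h3.1

-- ===== VERDICT (by name: the statement is the Claim_ definition above) =====
theorem finish_order_py_spec : Claim_equal_finish_order_py := by
  intro g _ hpre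
  unfold Spec_finish_order_py finish_order_py finish_order_py_alt
  have hc : ∀ u : Int, ∀ v ∈ (PySem.Dict.ofList g).getD u [], v ∈ (PySem.Dict.ofList g).keys := by
    intro u v hv
    rw [PySem.Dict.getD_eq_get?_getD] at hv
    cases hq : (PySem.Dict.ofList g).get? u with
    | none => rw [hq] at hv; cases hv
    | some cs =>
      rw [hq] at hv
      have hitems : (u, cs) ∈ (PySem.Dict.ofList g).items :=
        PySem.Dict.mem_items_of_get?_eq_some _ hq
      have hmem : (u, cs) ∈ g := by
        rcases pv_mem_items_update g PySem.Dict.empty hitems with h | h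
        · exact h
        · cases h
      have hk := hpre (u, cs) hmem v hv
      rw [pv_keys_ofList]
      exact (PySem.Set.mem_ofList _ _).mpr hk
  have hnd : (PySem.Dict.ofList g).keys.Nodup := by
    rw [pv_keys_ofList]; exact PySem.Set.nodup_ofList _
  have hU : pvU (PySem.Dict.ofList g) PySem.Set.empty < g.length + 2 := by
    have h1 : pvU (PySem.Dict.ofList g) PySem.Set.empty ≤ (PySem.Dict.ofList g).keys.length :=
      List.length_filter_le _ _
    have h2 : (PySem.Dict.ofList g).keys.length ≤ g.length := by
      rw [pv_keys_ofList]
      calc (PySem.Set.ofList (g.map Prod.fst)).length ≤ (g.map Prod.fst).length :=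
            PySem.Set.length_ofList_le _
        _ = g.length := List.length_map ..
    omega
  exact congrArg Prod.snd (pvTop (PySem.Dict.ofList g) hc hnd (PySem.Dict.ofList g).keys
    (PySem.Set.empty, []) (g.length + 2) (g.length + 2) (fun u hu => hu) hU hU)
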